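-- pv_equiv track=rewrite | github.com/SimBowen/DiscordPekoBot | MessageHandlers/MessageReactions.py | pekofy
-- ===== SOURCE A (Python) =====
-- def pekofy(input): #Peko.
--     output = input
--     delimiters = ['.',',','!','?']
--     res = any(ele in delimiters for ele in input)
--     if res:
--         output = output.replace("."," peko.")
--         output = output.replace(","," peko,")
--         output = output.replace("!"," peko!")
--         output = output.replace("?"," peko?")
--     else:
--         output += " peko."
--     return output
-- ===== SOURCE B (Python) =====
-- def pekofy(input):
--     parts = []
--     found = False
--     for ch in input:
--         if ch in ".,!?":
--             parts.append(" peko")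
--             found = True
--         parts.append(ch)
--     if not found:
--         parts.append(" peko.")
--     return "".join(parts)
-- ===== Notes on version B (the rewrite author's own statement) =====
-- stated objective: faster
-- what changed: Replaces A's any() membership pre-scan plus four sequential str.replace passes over the whole string with one left-to-right traversal that inserts the peko marker before each delimiter and tracks with a flag whether any was seen.
import Mathlib
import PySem

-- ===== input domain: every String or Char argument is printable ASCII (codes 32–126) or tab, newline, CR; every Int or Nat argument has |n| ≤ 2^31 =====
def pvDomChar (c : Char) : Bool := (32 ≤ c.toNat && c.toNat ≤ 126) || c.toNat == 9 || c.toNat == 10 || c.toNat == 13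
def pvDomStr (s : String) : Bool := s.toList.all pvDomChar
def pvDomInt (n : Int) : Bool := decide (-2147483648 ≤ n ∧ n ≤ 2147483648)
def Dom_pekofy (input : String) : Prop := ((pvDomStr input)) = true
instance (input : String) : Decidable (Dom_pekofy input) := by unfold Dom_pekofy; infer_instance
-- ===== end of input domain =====

-- B replaces A's any() pre-scan plus four str.replace passes with one single-pass accumulate loop (alternative decomposition, same result).

-- ===== PORT A =====
def pekofy (input : String) : String :=
  let output := input
  let delimiters : List Char := ['.', ',', '!', '?']
  let res := input.toList.any (fun ele => delimiters.contains ele)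
  if res then
    let output := PySem.Str.replace output "." " peko."
    let output := PySem.Str.replace output "," " peko,"
    let output := PySem.Str.replace output "!" " peko!"
    let output := PySem.Str.replace output "?" " peko?"
    output
  else
    String.ofList (output.toList ++ " peko.".toList)

-- ===== PORT B =====
-- step of B's for-loop: parts is the char accumulator, found the flag
def pekofyStep (acc : List Char × Bool) (ch : Char) : List Char × Bool :=
  if (".,!?".toList).contains ch then (acc.1 ++ " peko".toList ++ [ch], true)
  else (acc.1 ++ [ch], acc.2)

def pekofy_alt (input : String) : String :=
  let r := input.toList.foldl pekofyStep ([], false)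
  if r.2 then String.ofList r.1 else String.ofList (r.1 ++ " peko.".toList)

-- ===== PRECONDITION & SPEC =====
def Spec_pekofy (input : String) (out : String) : Prop := out = pekofy_alt input
instance (input : String) (out : String) : Decidable (Spec_pekofy input out) := by unfold Spec_pekofy; infer_instance

-- ===== CLAIM (what is proved, stated in full; the proofs are below) =====
def Claim_equal_pekofy : Prop := ∀ (input : String), Dom_pekofy input → Spec_pekofy input (pekofy input)

-- ===== LEMMAS AND PROOFS =====

-- the per-character rewrite both programs implement
def pekoG (c : Char) : List Char :=
  if c ∈ ['.', ',', '!', '?'] then " peko".toList ++ [c] else [c]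

-- single-char replace is a flatMap
theorem replace_go_single (d : Char) (new : List Char) :
    ∀ (fuel : Nat) (l acc : List Char), l.length ≤ fuel →
      PySem.Chars.replace.go [d] new fuel l acc
        = acc.reverse ++ l.flatMap (fun c => if c = d then new else [c]) := by
  intro fuel
  induction fuel with
  | zero =>
    intro l acc h
    have : l = [] := List.eq_nil_of_length_eq_zero (Nat.le_zero.mp h)
    subst this; simp [PySem.Chars.replace.go]
  | succ n ih =>
    intro l acc h
    cases l with
    | nil => simp [PySem.Chars.replace.go]
    | cons c t =>
      simp only [PySem.Chars.replace.go]
      by_cases hc : c = d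
      · subst hc
        have hpre : List.isPrefixOf [c] (c :: t) = true := by
          simp [List.isPrefixOf]
        rw [if_pos hpre]
        have hd : List.drop [c].length (c :: t) = t := rfl
        rw [hd, ih t (new.reverse ++ acc) (by simpa using Nat.lt_succ_iff.mp (by simpa using h))]
        simp
      · have hpre : List.isPrefixOf [d] (c :: t) = false := by
          simp only [List.isPrefixOf, Bool.and_eq_false_iff, beq_eq_false_iff_ne, ne_eq]
          exact Or.inl fun hdc => hc hdc.symm
        rw [hpre]
        simp only [Bool.false_eq_true, if_false]
        rw [ih t (c :: acc) (by simpa using Nat.lt_succ_iff.mp (by simpa using h))]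
        simp [hc]

theorem replace_single (s : List Char) (d : Char) (new : List Char) :
    PySem.Chars.replace s [d] new = s.flatMap (fun c => if c = d then new else [c]) := by
  simp [PySem.Chars.replace, replace_go_single d new s.length s [] le_rfl]

-- the four chained replaces collapse to one flatMap of pekoG
theorem chain_eq_flatMap (s : List Char) :
    ((((s.flatMap (fun c => if c = '.' then " peko.".toList else [c])).flatMap
        (fun c => if c = ',' then " peko,".toList else [c])).flatMap
        (fun c => if c = '!' then " peko!".toList else [c])).flatMap
        (fun c => if c = '?' then " peko?".toList else [c]))
      = s.flatMap pekoG := by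
  induction s with
  | nil => rfl
  | cons c t ih =>
    simp only [List.flatMap_cons, List.flatMap_append] at *
    rw [ih]
    congr 1
    by_cases h1 : c = '.'
    · subst h1; rfl
    by_cases h2 : c = ','
    · subst h2; rfl
    by_cases h3 : c = '!'
    · subst h3; rfl
    by_cases h4 : c = '?'
    · subst h4; rfl
    simp [pekoG, h1, h2, h3, h4]

-- B's loop invariant
theorem foldl_pekofyStep (s : List Char) :
    ∀ (acc : List Char) (b : Bool),
      s.foldl pekofyStep (acc, b)
        = (acc ++ s.flatMap pekoG, b || s.any (fun c => (".,!?".toList).contains c)) := by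
  have hl : ".,!?".toList = ['.', ',', '!', '?'] := rfl
  induction s with
  | nil => intro acc b; simp
  | cons c t ih =>
    intro acc b
    simp only [List.foldl_cons, List.flatMap_cons, List.any_cons]
    by_cases h : c ∈ (['.', ',', '!', '?'] : List Char)
    · rw [show pekofyStep (acc, b) c = (acc ++ " peko".toList ++ [c], true) from by
        simp [pekofyStep, hl, h]]
      rw [ih]
      have hg : pekoG c = " peko".toList ++ [c] := by simp [pekoG, h]
      simp [hg, hl, h]
    · rw [show pekofyStep (acc, b) c = (acc ++ [c], b) from by simp [pekofyStep, hl, h]]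
      rw [ih]
      have hg : pekoG c = [c] := by simp [pekoG, h]
      simp [hg, hl, h]

theorem flatMap_pekoG_of_no_delim (s : List Char)
    (h : s.any (fun c => (".,!?".toList).contains c) = false) :
    s.flatMap pekoG = s := by
  induction s with
  | nil => rfl
  | cons c t ih =>
    simp only [List.any_cons, Bool.or_eq_false_iff] at h
    have hc : pekoG c = [c] := by
      have := h.1
      simp only [List.contains_eq_mem] at this
      simp at this
      simp [pekoG, this.1, this.2.1, this.2.2.1, this.2.2.2]
    simp [hc, ih h.2]

-- ===== VERDICT (by name: the statement is the Claim_ definition above) =====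
theorem pekofy_spec : Claim_equal_pekofy := by
  intro input _
  unfold Spec_pekofy pekofy pekofy_alt
  rw [foldl_pekofyStep input.toList [] false]
  simp only [Bool.false_or, List.nil_append]
  by_cases hres : input.toList.any (fun c => (".,!?".toList).contains c)
  · have hres' : input.toList.any (fun ele => (['.', ',', '!', '?'] : List Char).contains ele) = true := by
      simpa using hres
    rw [if_pos hres', hres, if_pos rfl]
    simp only [PySem.Str.replace, String.toList_ofList]
    congr 1
    rw [show ("." : String).toList = ['.'] from rfl, show ("," : String).toList = [','] from rfl,
      show ("!" : String).toList = ['!'] from rfl, show ("?" : String).toList = ['?'] from rfl,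
      replace_single, replace_single, replace_single, replace_single]
    exact chain_eq_flatMap input.toList
  · have hresF : input.toList.any (fun c => (".,!?".toList).contains c) = false := by
      simpa using hres
    have hres' : input.toList.any (fun ele => (['.', ',', '!', '?'] : List Char).contains ele) = false := by
      simpa using hresF
    rw [if_neg (by rw [hres']; exact Bool.false_ne_true), hresF]
    simp only [Bool.false_eq_true, if_false]
    rw [flatMap_pekoG_of_no_delim input.toList hresF]
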